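-- pv_equiv track=rewrite | github.com/TarekElshami/PLN_Document_Anonymization | CoNLL eval.py | process_tagged_text
-- ===== SOURCE A (Python) =====
-- def process_tagged_text(tagged_text, entities):
--     """Convierte el texto etiquetado y entidades en formato BIO."""
--     # Reemplazar etiquetas XML por marcadores temporales
--     text = tagged_text
--     for entity_type in ['LOC', 'ORG', 'PER', 'MISC']:
--         text = text.replace(f'<{entity_type}>', f'[{entity_type}_START]')
--         text = text.replace(f'</{entity_type}>', f'[{entity_type}_END]')
--
--     # Dividir el texto en tokens
--     tokens = text.split()
--     bio_tags = []
--
--     i = 0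
--     while i < len(tokens):
--         token = tokens[i]
--         if token.startswith('[LOC_START]'):
--             entity_name = []
--             i += 1
--             while i < len(tokens) and not tokens[i].endswith('[LOC_END]'):
--                 entity_name.append(tokens[i])
--                 i += 1
--             if i < len(tokens) and tokens[i].endswith('[LOC_END]'):
--                 entity_name.append(tokens[i].replace('[LOC_END]', ''))
--                 i += 1
--             if entity_name:
--                 bio_tags.append((entity_name[0], 'B-LOC'))
--                 for word in entity_name[1:]:
--                     bio_tags.append((word, 'I-LOC'))
--         elif token.startswith('[ORG_START]'):
--             entity_name = []
--             i += 1
--             while i < len(tokens) and not tokens[i].endswith('[ORG_END]'):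
--                 entity_name.append(tokens[i])
--                 i += 1
--             if i < len(tokens) and tokens[i].endswith('[ORG_END]'):
--                 entity_name.append(tokens[i].replace('[ORG_END]', ''))
--                 i += 1
--             if entity_name:
--                 bio_tags.append((entity_name[0], 'B-ORG'))
--                 for word in entity_name[1:]:
--                     bio_tags.append((word, 'I-ORG'))
--         elif token.startswith('[PER_START]'):
--             entity_name = []
--             i += 1
--             while i < len(tokens) and not tokens[i].endswith('[PER_END]'):
--                 entity_name.append(tokens[i])
--                 i += 1
--             if i < len(tokens) and tokens[i].endswith('[PER_END]'):
--                 entity_name.append(tokens[i].replace('[PER_END]', ''))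
--                 i += 1
--             if entity_name:
--                 bio_tags.append((entity_name[0], 'B-PER'))
--                 for word in entity_name[1:]:
--                     bio_tags.append((word, 'I-PER'))
--         elif token.startswith('[MISC_START]'):
--             entity_name = []
--             i += 1
--             while i < len(tokens) and not tokens[i].endswith('[MISC_END]'):
--                 entity_name.append(tokens[i])
--                 i += 1
--             if i < len(tokens) and tokens[i].endswith('[MISC_END]'):
--                 entity_name.append(tokens[i].replace('[MISC_END]', ''))
--                 i += 1
--             if entity_name:
--                 bio_tags.append((entity_name[0], 'B-MISC'))
--                 for word in entity_name[1:]: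
--                     bio_tags.append((word, 'I-MISC'))
--         else:
--             bio_tags.append((token, 'O'))
--             i += 1
--
--     return bio_tags
-- ===== SOURCE B (Python) =====
-- TYPES = ['LOC', 'ORG', 'PER', 'MISC']
--
--
-- def process_tagged_text(tagged_text, entities):
--     """Convierte el texto etiquetado y entidades en formato BIO."""
--     text = tagged_text
--     for t in TYPES:
--         text = text.replace(f'<{t}>', f'[{t}_START]')
--         text = text.replace(f'</{t}>', f'[{t}_END]')
--
--     out = []
--     cur = None        # (end_marker, 'B-'+type, 'I-'+type) while inside an entity
--     started = False
--     for token in text.split():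
--         if cur is None:
--             for t in TYPES:
--                 if token.startswith(f'[{t}_START]'):
--                     cur = (f'[{t}_END]', 'B-' + t, 'I-' + t)
--                     started = False
--                     break
--             else:
--                 out.append((token, 'O'))
--         elif token.endswith(cur[0]):
--             out.append((token.replace(cur[0], ''), cur[2] if started else cur[1]))
--             cur = None
--         else:
--             out.append((token, cur[2] if started else cur[1]))
--             started = True
--     return out
-- ===== Notes on version B (the rewrite author's own statement) =====
-- stated objective: simpler
-- what changed: Replaces the four duplicated start-branch blocks with nested token-consuming while loops by one flat state-machine pass over the tokens that keeps a current-entity/started state per token.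
import Mathlib
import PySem

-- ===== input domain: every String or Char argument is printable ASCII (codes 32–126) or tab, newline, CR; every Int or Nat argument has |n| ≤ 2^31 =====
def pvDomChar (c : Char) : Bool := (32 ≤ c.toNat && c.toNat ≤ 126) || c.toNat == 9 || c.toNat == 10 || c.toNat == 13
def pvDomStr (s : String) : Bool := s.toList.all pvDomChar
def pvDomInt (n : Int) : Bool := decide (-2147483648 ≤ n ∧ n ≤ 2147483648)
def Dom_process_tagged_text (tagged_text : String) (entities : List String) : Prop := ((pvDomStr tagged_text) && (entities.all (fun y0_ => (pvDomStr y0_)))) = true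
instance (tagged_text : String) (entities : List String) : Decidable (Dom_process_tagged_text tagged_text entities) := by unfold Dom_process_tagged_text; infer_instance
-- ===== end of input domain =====

-- B replaces A's four duplicated start-branch blocks (each with a nested token-consuming
-- inner while) by one flat state-machine pass keeping a current-entity/started state; same
-- return value, no speed claim.

-- ===== PORT A =====
-- the XML-tag → marker substitutions both Pythons perform identically (A's first for loop)
def pvReplaceTags (text : String) : String :=
  let text := PySem.Str.replace text "<LOC>" "[LOC_START]"
  let text := PySem.Str.replace text "</LOC>" "[LOC_END]"
  let text := PySem.Str.replace text "<ORG>" "[ORG_START]"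
  let text := PySem.Str.replace text "</ORG>" "[ORG_END]"
  let text := PySem.Str.replace text "<PER>" "[PER_START]"
  let text := PySem.Str.replace text "</PER>" "[PER_END]"
  let text := PySem.Str.replace text "<MISC>" "[MISC_START]"
  let text := PySem.Str.replace text "</MISC>" "[MISC_END]"
  text

-- A's inner while: collect tokens until one ends with endM; that one is appended with the
-- marker stripped (replace-all, as Python's .replace).  Returns (entity_name, remaining tokens).
def pvScan (endM : String) : List String → (List String × List String)
  | [] => ([], [])
  | t :: ts =>
    if PySem.Str.endswith t endM then ([PySem.Str.replace t endM ""], ts)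
    else
      let p := pvScan endM ts
      (t :: p.1, p.2)

-- A's emission: first word B-tagged, the rest I-tagged, nothing for an empty entity_name
def pvEmit (btag itag : String) : List String → List (String × String)
  | [] => []
  | w :: ws => (w, btag) :: ws.map (fun x => (x, itag))

theorem pvScan_snd_length_le (endM : String) : ∀ ts : List String, (pvScan endM ts).2.length ≤ ts.length := by
  intro ts
  induction ts with
  | nil => simp [pvScan]
  | cons t ts ih =>
    simp only [pvScan]
    split
    · simp
    · simpa using Nat.le_succ_of_le ih

-- A's outer while over the token list
def pvALoop : List String → List (String × String)
  | [] => []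
  | t :: ts =>
    if PySem.Str.startswith t "[LOC_START]" then
      pvEmit "B-LOC" "I-LOC" (pvScan "[LOC_END]" ts).1 ++ pvALoop (pvScan "[LOC_END]" ts).2
    else if PySem.Str.startswith t "[ORG_START]" then
      pvEmit "B-ORG" "I-ORG" (pvScan "[ORG_END]" ts).1 ++ pvALoop (pvScan "[ORG_END]" ts).2
    else if PySem.Str.startswith t "[PER_START]" then
      pvEmit "B-PER" "I-PER" (pvScan "[PER_END]" ts).1 ++ pvALoop (pvScan "[PER_END]" ts).2
    else if PySem.Str.startswith t "[MISC_START]" then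
      pvEmit "B-MISC" "I-MISC" (pvScan "[MISC_END]" ts).1 ++ pvALoop (pvScan "[MISC_END]" ts).2
    else
      (t, "O") :: pvALoop ts
termination_by l => l.length
decreasing_by all_goals (simp only [List.length_cons]; apply Nat.lt_succ_of_le; first | exact pvScan_snd_length_le _ _ | exact Nat.le_refl _)

def process_tagged_text (tagged_text : String) (entities : List String) : List (String × String) :=
  pvALoop (PySem.Str.split₀ (pvReplaceTags tagged_text))

-- ===== PORT B =====
-- Source B's inner for-with-break over TYPES: the marker data for the type the token starts with
def pvFindStart (token : String) : Option (String × String × String) :=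
  if PySem.Str.startswith token "[LOC_START]" then some ("[LOC_END]", "B-LOC", "I-LOC")
  else if PySem.Str.startswith token "[ORG_START]" then some ("[ORG_END]", "B-ORG", "I-ORG")
  else if PySem.Str.startswith token "[PER_START]" then some ("[PER_END]", "B-PER", "I-PER")
  else if PySem.Str.startswith token "[MISC_START]" then some ("[MISC_END]", "B-MISC", "I-MISC")
  else none

-- Source B's single flat loop: state = (cur, started)
def pvBLoop : Option (String × String × String) → Bool → List String → List (String × String)
  | _, _, [] => []
  | none, started, t :: ts =>
    match pvFindStart t with
    | some m => pvBLoop (some m) false ts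
    | none => (t, "O") :: pvBLoop none started ts
  | some (endM, btag, itag), started, t :: ts =>
    if PySem.Str.endswith t endM then
      (PySem.Str.replace t endM "", if started then itag else btag) :: pvBLoop none started ts
    else
      (t, if started then itag else btag) :: pvBLoop (some (endM, btag, itag)) true ts

def process_tagged_text_alt (tagged_text : String) (entities : List String) : List (String × String) :=
  pvBLoop none false (PySem.Str.split₀ (pvReplaceTags tagged_text))

-- ===== PRECONDITION & SPEC =====
def Spec_process_tagged_text (tagged_text : String) (entities : List String) (out : List (String × String)) : Prop := out = process_tagged_text_alt tagged_text entities
instance (tagged_text : String) (entities : List String) (out : List (String × String)) : Decidable (Spec_process_tagged_text tagged_text entities out) := by unfold Spec_process_tagged_text; infer_instance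

-- ===== CLAIM (what is proved, stated in full; the proofs are below) =====
def Claim_equal_process_tagged_text : Prop := ∀ (tagged_text : String) (entities : List String), Dom_process_tagged_text tagged_text entities → Spec_process_tagged_text tagged_text entities (process_tagged_text tagged_text entities)

-- ===== LEMMAS AND PROOFS =====

-- in the `none` state Source B never reads `started`
theorem pvBLoop_none_started (ts : List String) : ∀ s1 s2 : Bool, pvBLoop none s1 ts = pvBLoop none s2 ts := by
  induction ts with
  | nil => intro _ _; rfl
  | cons t ts ih =>
    intro s1 s2
    simp only [pvBLoop]
    cases pvFindStart t with
    | some m => rfl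
    | none => simp [ih s1 s2]

-- the words of one entity, tagged threading the `started` flag (what Source B emits inside an entity)
def pvTagList (started : Bool) (btag itag : String) : List String → List (String × String)
  | [] => []
  | w :: ws => (w, if started then itag else btag) :: pvTagList true btag itag ws

theorem pvTagList_true (btag itag : String) : ∀ ws : List String, pvTagList true btag itag ws = ws.map (fun x => (x, itag)) := by
  intro ws
  induction ws with
  | nil => rfl
  | cons w ws ih => simp [pvTagList, ih]

theorem pvTagList_false_eq_emit (btag itag : String) (ws : List String) :
    pvTagList false btag itag ws = pvEmit btag itag ws := by
  cases ws with
  | nil => rfl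
  | cons w ws => simp [pvTagList, pvEmit, pvTagList_true]

-- Source B inside an entity behaves like A's inner scan followed by A's emission
theorem pvBLoop_some (endM btag itag : String) : ∀ (ts : List String) (started : Bool),
    pvBLoop (some (endM, btag, itag)) started ts =
      pvTagList started btag itag (pvScan endM ts).1 ++ pvBLoop none false (pvScan endM ts).2 := by
  intro ts
  induction ts with
  | nil => intro started; simp [pvBLoop, pvScan, pvTagList]
  | cons t ts ih =>
    intro started
    simp only [pvBLoop, pvScan]
    split
    · simp [pvTagList, pvBLoop_none_started ts started false]
    · simp [pvTagList, ih true]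

theorem pvALoop_eq_pvBLoop : ∀ (n : Nat) (ts : List String), ts.length ≤ n → pvALoop ts = pvBLoop none false ts := by
  intro n
  induction n with
  | zero =>
    intro ts h
    have : ts = [] := List.eq_nil_of_length_eq_zero (Nat.le_zero.mp h)
    subst this; rw [pvALoop]; rfl
  | succ n ih =>
    intro ts h
    cases ts with
    | nil => rw [pvALoop]; rfl
    | cons t ts =>
      rw [pvALoop]
      simp only [pvBLoop, pvFindStart]
      have hlen : ts.length ≤ n := by simpa using h
      split_ifs with h1 h2 h3 h4 <;>
        simp only [pvBLoop_some, pvTagList_false_eq_emit] <;>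
        [skip; skip; skip; skip;
         exact congrArg _ (ih ts hlen)] <;>
        exact congrArg _ (ih _ (le_trans (pvScan_snd_length_le _ _) hlen))

-- ===== VERDICT (by name: the statement is the Claim_ definition above) =====
theorem process_tagged_text_spec : Claim_equal_process_tagged_text := by
  intro tagged_text entities _
  unfold Spec_process_tagged_text process_tagged_text process_tagged_text_alt
  exact pvALoop_eq_pvBLoop _ _ (Nat.le_refl _)
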